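-- pv_equiv track=rewrite | github.com/y-plus/pyOSRD | src/pyosrd/utils/lists_utils.py | missing_elements_to_fill_holes
-- ===== SOURCE A (Python) =====
-- def missing_elements_to_fill_holes(
--     list_to_check: list,
--     reference_list: list
-- ) -> list:
--     """Detect missing element in a reference to fill holes in a given list
--
--     Parameters
--     ----------
--     list_to_check : list
--        List of element with potential ones not in the reference list
--     reference_list : list
--         List of elements
--
--     Returns
--     -------
--     list
--         Elements from list_to_check that are not in the reference
--         and that are between two elements also in reference list
--
--     Examples
--     --------
--     >>> ref_list = ['A', 'B', 'C', 'D']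
--     >>> missing_elements_to_fill_holes(['A', 'B', 'C'], ref_list)
--     []
--     >>> missing_elements_to_fill_holes(['A', 'Z', 'D'], ref_list)
--     ['Z']
--     >>> missing_elements_to_fill_holes(['A', 'C'], ref_list)
--     []
--     >>> missing_elements_to_fill_holes(['A', 'C', 'D', 'X'], ref_list)
--     []
--     >>> missing_elements_to_fill_holes(['A', 'Y', 'C', 'Z'], ref_list)
--     ['Y']
--     >>> missing_elements_to_fill_holes(['A', 'Y', 'Z', 'C'], ref_list)
--     ['Y', 'Z']
--     >>> missing_elements_to_fill_holes(['A', 'C', 'Z'], ref_list)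
--     []
--     >>> missing_elements_to_fill_holes(['Z', 'A', 'B', 'C'], ref_list)
--     []
--     >>> missing_elements_to_fill_holes(['Z', 'A', 'C'], ref_list)
--     []
--     >>> missing_elements_to_fill_holes(['A', 'Z', 'B'], ref_list)
--     ['Z']
--     """
--     check = [1 if e in reference_list else e for e in list_to_check]
--     missings = [
--         e for i, e in enumerate(check)
--         if e != 1 and 1 in check[:i] and 1 in check[i:]
--     ]
--
--     return missings
-- ===== SOURCE B (Python) =====
-- def missing_elements_to_fill_holes(
--     list_to_check: list,
--     reference_list: list
-- ) -> list:
--     ref = set(reference_list)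
--
--     def skip_leading_non_ref(xs):
--         k = 0
--         while k < len(xs) and xs[k] not in ref:
--             k += 1
--         return xs[k:]
--
--     core = skip_leading_non_ref(skip_leading_non_ref(list_to_check)[::-1])[::-1]
--     return [e for e in core if e not in ref]
-- ===== Notes on version B (the rewrite author's own statement) =====
-- stated objective: faster
-- what changed: Instead of rebuilding and rescanning the marker list for every element (per-element list membership plus prefix/suffix scans), B builds a set once, trims the leading and trailing non-reference elements, and filters the remaining middle in one pass.
import Mathlib
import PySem

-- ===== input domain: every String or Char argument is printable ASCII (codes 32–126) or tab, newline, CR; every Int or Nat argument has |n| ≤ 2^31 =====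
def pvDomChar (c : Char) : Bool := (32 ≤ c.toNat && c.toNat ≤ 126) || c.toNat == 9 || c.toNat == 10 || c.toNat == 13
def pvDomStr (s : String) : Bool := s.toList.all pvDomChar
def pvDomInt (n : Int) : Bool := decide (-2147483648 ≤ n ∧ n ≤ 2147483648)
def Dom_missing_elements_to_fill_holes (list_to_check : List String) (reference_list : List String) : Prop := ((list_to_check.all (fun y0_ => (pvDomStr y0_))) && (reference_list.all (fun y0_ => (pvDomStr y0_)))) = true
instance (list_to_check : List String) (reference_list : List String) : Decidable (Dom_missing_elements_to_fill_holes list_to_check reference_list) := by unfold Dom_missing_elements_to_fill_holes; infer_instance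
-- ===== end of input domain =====

-- B replaces A's per-element list-membership plus prefix/suffix rescans by a set built once,
-- trimming leading/trailing non-reference elements and filtering the middle in one pass (faster, measured).


-- ===== PORT A =====
-- Python's `check` mixes the int 1 with strings; a string never equals 1, so `1` is
-- modelled exactly as `none` and a kept element as `some e`.
def missing_elements_to_fill_holes (list_to_check : List String) (reference_list : List String) : List String :=
  let check : List (Option String) :=
    list_to_check.map (fun e => if reference_list.contains e then none else some e)
  (PySem.List.enumerate check 0).filterMap (fun ie =>
    match ie.2 with
    | none => none                       -- e == 1
    | some s =>                          -- e != 1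
      if (PySem.List.slice check none (some ie.1)).contains none
          && (PySem.List.slice check (some ie.1) none).contains none
      then some s else none)

-- ===== PORT B =====
-- skip_leading_non_ref's index loop + tail slice is List.dropWhile (skip leading elements not in ref)
def missing_elements_to_fill_holes_alt (list_to_check : List String) (reference_list : List String) : List String :=
  let ref := PySem.Set.ofList reference_list
  let skip_leading_non_ref : List String → List String :=
    fun xs => xs.dropWhile (fun e => !(PySem.Set.contains ref e))
  let core := (skip_leading_non_ref ((skip_leading_non_ref list_to_check).reverse)).reverse
  core.filter (fun e => !(PySem.Set.contains ref e))

-- ===== PRECONDITION & SPEC =====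
def Spec_missing_elements_to_fill_holes (list_to_check : List String) (reference_list : List String) (out : List String) : Prop := out = missing_elements_to_fill_holes_alt list_to_check reference_list
instance (list_to_check : List String) (reference_list : List String) (out : List String) : Decidable (Spec_missing_elements_to_fill_holes list_to_check reference_list out) := by unfold Spec_missing_elements_to_fill_holes; infer_instance

-- ===== CLAIM (what is proved, stated in full; the proofs are below) =====
def Claim_equal_missing_elements_to_fill_holes : Prop := ∀ (list_to_check : List String) (reference_list : List String), Dom_missing_elements_to_fill_holes list_to_check reference_list → Spec_missing_elements_to_fill_holes list_to_check reference_list (missing_elements_to_fill_holes list_to_check reference_list)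

-- ===== LEMMAS AND PROOFS =====

-- A's marker function: `1` (= `none`) for reference elements, the element itself otherwise.
def pvF (r : List String) (e : String) : Option String :=
  if r.contains e then none else some e

-- A's loop, restated structurally: `seen` = "a reference element occurred strictly before".
def pvAux (p : String → Bool) : Bool → List String → List String
  | _, [] => []
  | seen, x :: t =>
      if p x then pvAux p true t
      else if seen && t.any p then x :: pvAux p seen t else pvAux p seen t

theorem contains_none_map (r : List String) (s : List String) :
    ((s.map (pvF r)).contains none) = s.any (fun e => r.contains e) := by
  induction s with
  | nil => rfl
  | cons x t ih =>
    by_cases h : x ∈ r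
    · simp [pvF, h]
    · simp only [List.map_cons]
      rw [List.contains_cons, ih]
      simp [pvF, h]

theorem set_contains_ofList (r : List String) (e : String) :
    PySem.Set.contains (PySem.Set.ofList r) e = r.contains e := by
  by_cases hm : e ∈ r <;> simp [PySem.Set.mem_ofList, hm]

theorem dropWhile_head_false {α : Type} (q : α → Bool) :
    ∀ (l : List α) (y : α) (ys : List α), l.dropWhile q = y :: ys → q y = false := by
  intro l
  induction l with
  | nil => intro y ys h; simp [List.dropWhile] at h
  | cons a t ih =>
    intro y ys h
    by_cases hq : q a = true
    · rw [List.dropWhile_cons_of_pos hq] at h; exact ih _ _ h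
    · rw [List.dropWhile_cons_of_neg hq] at h
      injection h with h1 _
      subst h1
      simpa using hq

theorem genA (r l : List String) (t : List String) (k : Nat) (ht : t = l.drop k) :
    (PySem.List.enumerate (t.map (pvF r)) (k : Int)).filterMap
      (fun ie => match ie.2 with
        | none => none
        | some s =>
          if ((PySem.List.slice (l.map (pvF r)) none (some ie.1)).contains none)
              && ((PySem.List.slice (l.map (pvF r)) (some ie.1) none).contains none)
          then some s else none)
    = pvAux (fun e => r.contains e) ((l.take k).any (fun e => r.contains e)) t := by
  induction t generalizing k with
  | nil => simp [PySem.List.enumerate_nil, pvAux]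
  | cons x m ih =>
    have hget : l[k]? = some x := by
      have h0 : (l.drop k)[0]? = some x := by rw [← ht]; rfl
      simpa using h0
    have hm : m = l.drop (k + 1) := by
      have h1 := congrArg (List.drop 1) ht
      simpa [List.drop_drop, Nat.add_comm] using h1
    have htake : l.take (k + 1) = l.take k ++ [x] := by
      rw [List.take_add_one, hget]; rfl
    have hsliceL : (PySem.List.slice (l.map (pvF r)) none (some (k : Int))).contains none
        = (l.take k).any (fun e => r.contains e) := by
      rw [PySem.List.slice_to_natCast, ← List.map_take, contains_none_map]
    have hsliceR : (PySem.List.slice (l.map (pvF r)) (some (k : Int)) none).contains none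
        = (x :: m).any (fun e => r.contains e) := by
      rw [PySem.List.slice_from_natCast, ← List.map_drop, ← ht, contains_none_map]
    have hcast : (k : Int) + 1 = ((k + 1 : Nat) : Int) := by push_cast; ring
    rw [List.map_cons, PySem.List.enumerate_cons, List.filterMap_cons, hcast,
      ih (k + 1) hm]
    by_cases hx : x ∈ r
    · -- pvF r x = none: element skipped, `seen` becomes true
      simp [pvF, hx, pvAux, htake]
    · -- pvF r x = some x
      have hseen : (l.take (k + 1)).any (fun e => r.contains e)
          = (l.take k).any (fun e => r.contains e) := by
        rw [htake]; simp [hx]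
      have hxb : r.contains x = false := by simp [hx]
      simp only [pvF, hxb, Bool.false_eq_true, if_false, hsliceL, hsliceR, hseen, pvAux]
      simp only [List.any_cons, hxb, Bool.false_or]
      by_cases hc : (∃ y ∈ List.take k l, y ∈ r) ∧ ∃ y ∈ m, y ∈ r
      · simp [hc]
      · simp [hc]

theorem portA_eq_pvAux (l r : List String) :
    missing_elements_to_fill_holes l r = pvAux (fun e => r.contains e) false l := by
  have h := genA r l l 0 (by simp)
  unfold missing_elements_to_fill_holes
  rw [show (fun e => if r.contains e then (none : Option String) else some e) = pvF r from rfl]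
  simpa using h

theorem pvAux_true_eq (p : String → Bool) (t : List String) :
    pvAux p true t
      = ((t.reverse.dropWhile (fun e => !p e)).reverse).filter (fun e => !p e) := by
  induction t with
  | nil => simp [pvAux]
  | cons x m ih =>
    rw [List.reverse_cons, List.dropWhile_append]
    by_cases hnil : m.reverse.dropWhile (fun e => !p e) = []
    · have hall : ∀ e ∈ m, p e = false := by
        intro e he
        have h2 := List.dropWhile_eq_nil_iff.mp hnil e (List.mem_reverse.mpr he)
        simpa using h2
      have hihnil : pvAux p true m = [] := by rw [ih, hnil]; simp
      have hanyf : m.any p = false := by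
        simp only [List.any_eq_false]; intro e he; simp [hall e he]
      rw [hnil]
      by_cases hx : p x = true
      · simp [pvAux, hx, hihnil]
      · simp [pvAux, hx, hihnil, hanyf]
    · rcases List.ne_nil_iff_exists_cons.mp hnil with ⟨y, ys, hy⟩
      have hymem : y ∈ m := by
        have h3 : y ∈ m.reverse.dropWhile (fun e => !p e) := by
          rw [hy]; exact List.mem_cons_self
        exact List.mem_reverse.mp ((List.dropWhile_sublist _).subset h3)
      have hpy : p y = true := by
        have h4 := dropWhile_head_false (fun e => !p e) m.reverse y ys hy
        simpa using h4
      have hany : m.any p = true := List.any_eq_true.mpr ⟨y, hymem, hpy⟩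
      rw [if_neg (by simpa [List.isEmpty_iff] using hnil)]
      by_cases hx : p x = true
      · simp [pvAux, hx, ih]
      · simp [pvAux, hx, ih, hany]

theorem pvAux_false_eq (p : String → Bool) (l : List String) :
    pvAux p false l
      = ((((l.dropWhile (fun e => !p e)).reverse).dropWhile (fun e => !p e)).reverse).filter
          (fun e => !p e) := by
  induction l with
  | nil => simp [pvAux]
  | cons x t ih =>
    by_cases hx : p x = true
    · have hdw : (x :: t).dropWhile (fun e => !p e) = x :: t := by
        rw [List.dropWhile_cons_of_neg (by simp [hx])]
      rw [hdw]
      have h1 : pvAux p false (x :: t) = pvAux p true t := by simp [pvAux, hx]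
      have h2 : pvAux p true (x :: t) = pvAux p true t := by simp [pvAux, hx]
      rw [h1, ← h2, pvAux_true_eq]
    · have hdw : (x :: t).dropWhile (fun e => !p e) = t.dropWhile (fun e => !p e) := by
        rw [List.dropWhile_cons_of_pos (by simp [hx])]
      rw [hdw, ← ih]
      simp [pvAux, hx]

theorem portB_eq (l r : List String) :
    missing_elements_to_fill_holes_alt l r
      = ((((l.dropWhile (fun e => !(r.contains e))).reverse).dropWhile
            (fun e => !(r.contains e))).reverse).filter (fun e => !(r.contains e)) := by
  simp only [missing_elements_to_fill_holes_alt, set_contains_ofList]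

-- ===== VERDICT (by name: the statement is the Claim_ definition above) =====
theorem missing_elements_to_fill_holes_spec : Claim_equal_missing_elements_to_fill_holes := by
  intro l r _
  unfold Spec_missing_elements_to_fill_holes
  rw [portA_eq_pvAux, pvAux_false_eq, portB_eq]
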